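-- pv_equiv track=rewrite | github.com/zer0reaction/python_snek | snake.py | get_head_line_position
-- ===== SOURCE A (Python) =====
-- grid_size = 35
--
-- def get_head_line_position(head_pos):
--     counter = 0
--     for i in range(grid_size):
--         line_position = 1
--         for x in range(grid_size):
--             if counter == head_pos:
--                 return line_position
--             counter += 1
--             line_position += 1
-- ===== SOURCE B (Python) =====
-- grid_size = 35
--
-- def get_head_line_position(head_pos):
--     if 0 <= head_pos < grid_size ** 2:
--         return head_pos % grid_size + 1
--     return None
-- ===== Notes on version B (the rewrite author's own statement) =====
-- stated objective: simpler
-- what changed: Replaced the nested counting loops with the closed form head_pos % grid_size + 1 guarded by a range check 0 <= head_pos < grid_size**2 (None outside, like the loop falling off the end).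
import Mathlib
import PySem

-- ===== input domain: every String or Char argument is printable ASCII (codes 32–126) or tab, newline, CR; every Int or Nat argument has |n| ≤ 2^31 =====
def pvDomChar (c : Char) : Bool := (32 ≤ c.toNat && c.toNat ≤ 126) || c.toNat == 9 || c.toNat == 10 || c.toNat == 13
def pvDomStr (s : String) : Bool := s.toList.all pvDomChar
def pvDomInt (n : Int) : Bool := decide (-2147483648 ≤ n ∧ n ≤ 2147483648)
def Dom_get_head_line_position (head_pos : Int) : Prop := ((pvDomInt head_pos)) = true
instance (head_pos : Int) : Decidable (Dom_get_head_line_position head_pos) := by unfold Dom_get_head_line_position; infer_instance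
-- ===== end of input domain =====

-- B replaces A's nested counting loops with the closed form head_pos % 35 + 1 under a range check (objective: simpler).

-- ===== PORT A =====
-- inner loop 'for x in range(grid_size)': returns (some line_position) on early return,
-- otherwise (none, final counter); fuel is the remaining iterations of the range.
def innerA (head_pos : Int) : Int → Int → Nat → Option Int × Int
  | counter, _, 0 => (none, counter)
  | counter, line_position, n + 1 =>
    if counter = head_pos then (some line_position, counter)
    else innerA head_pos (counter + 1) (line_position + 1) n

-- outer loop 'for i in range(grid_size)', threading counter
def outerA (head_pos : Int) : Int → Nat → Option Int
  | _, 0 => none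
  | counter, n + 1 =>
    match innerA head_pos counter 1 35 with
    | (some v, _) => some v
    | (none, c') => outerA head_pos c' n

def get_head_line_position (head_pos : Int) : Option Int :=
  outerA head_pos 0 35

-- ===== PORT B =====
def get_head_line_position_alt (head_pos : Int) : Option Int :=
  if 0 ≤ head_pos ∧ head_pos < 35 ^ 2 then some (PySem.Int.mod head_pos 35 + 1)
  else none

-- ===== PRECONDITION & SPEC =====
def Spec_get_head_line_position (head_pos : Int) (out : Option Int) : Prop := out = get_head_line_position_alt head_pos
instance (head_pos : Int) (out : Option Int) : Decidable (Spec_get_head_line_position head_pos out) := by unfold Spec_get_head_line_position; infer_instance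

-- ===== CLAIM (what is proved, stated in full; the proofs are below) =====
def Claim_equal_get_head_line_position : Prop := ∀ (head_pos : Int), Dom_get_head_line_position head_pos → Spec_get_head_line_position head_pos (get_head_line_position head_pos)

-- ===== LEMMAS AND PROOFS =====

theorem innerA_spec (h : Int) : ∀ (n : Nat) (c p : Int),
    innerA h c p n = if c ≤ h ∧ h < c + n then (some (h - c + p), c + (h - c)) else (none, c + n) := by
  intro n
  induction n with
  | zero => intro c p; simp [innerA]
  | succ n ih =>
    intro c p
    simp only [innerA]
    rcases eq_or_ne c h with rfl | hne
    · rw [if_pos rfl, if_pos (by push_cast; omega)]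
      simp
    · rw [if_neg hne, ih]
      by_cases hc : c + 1 ≤ h ∧ h < c + 1 + n
      · rw [if_pos hc, if_pos (by push_cast at hc ⊢; omega)]
        refine Prod.ext ?_ ?_ <;> simp <;> omega
      · rw [if_neg hc, if_neg (by push_cast at hc ⊢; omega)]
        refine Prod.ext rfl ?_
        simp; omega

theorem outerA_spec (h : Int) : ∀ (n : Nat) (c : Int),
    outerA h c n = if c ≤ h ∧ h < c + 35 * n then some ((h - c) % 35 + 1) else none := by
  intro n
  induction n with
  | zero => intro c; simp [outerA]
  | succ n ih =>
    intro c
    simp only [outerA, innerA_spec]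
    by_cases hc : c ≤ h ∧ h < c + (35 : Nat)
    · rw [if_pos hc]
      simp only
      rw [if_pos (by push_cast at hc ⊢; omega)]
      congr 2
      omega
    · rw [if_neg hc]
      simp only
      rw [ih]
      by_cases hc2 : c + (35 : Nat) ≤ h ∧ h < c + (35 : Nat) + 35 * n
      · rw [if_pos hc2, if_pos (by push_cast at hc hc2 ⊢; omega)]
        congr 2
        push_cast
        omega
      · rw [if_neg hc2, if_neg (by push_cast at hc hc2 ⊢; omega)]

-- ===== VERDICT (by name: the statement is the Claim_ definition above) =====
theorem get_head_line_position_spec : Claim_equal_get_head_line_position := by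
  intro h _
  unfold Spec_get_head_line_position get_head_line_position get_head_line_position_alt
  rw [outerA_spec]
  by_cases hc : 0 ≤ h ∧ h < 35 ^ 2
  · rw [if_pos (by omega), if_pos hc]
    rw [PySem.Int.mod_eq_emod_of_pos (by norm_num : (0:Int) < 35)]
    simp
  · rw [if_neg (by omega), if_neg hc]
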